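-- pv_equiv track=rewrite | github.com/eimiss/drone_project | backend/functions/feature_extraction_and_overlay.py | square_size
-- ===== SOURCE A (Python) =====
-- def square_size(primary_points):
--     #Source square
--     x_cords = [points[0] for points in primary_points]
--     y_cords = [points[1] for points in primary_points]
--
--     # Find minimum and maximum x and y coordinates
--     min_x = min(x_cords)
--     max_x = max(x_cords)
--     min_y = min(y_cords)
--     max_y = max(y_cords)
--
--     square_size = max(max_x - min_x, max_y - min_y)
--     return square_size
-- ===== SOURCE B (Python) =====
-- def square_size(primary_points):
--     # Divide and conquer: recursively merge bounding boxes of the two halves.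
--     def bbox(pts):
--         if len(pts) == 1:
--             x, y = pts[0]
--             return (x, x, y, y)
--         k = len(pts) // 2
--         a1, b1, c1, d1 = bbox(pts[:k])
--         a2, b2, c2, d2 = bbox(pts[k:])
--         return (min(a1, a2), max(b1, b2), min(c1, c2), max(d1, d2))
--     if not primary_points:
--         raise ValueError("square_size() arg is an empty sequence")
--     mnx, mxx, mny, mxy = bbox(primary_points)
--     return max(mxx - mnx, mxy - mny)
-- ===== Notes on version B (the rewrite author's own statement) =====
-- stated objective: alternative
-- what changed: B computes the bounding box by divide and conquer, recursively splitting the point list in half and merging the two halves' boxes, instead of A's extraction of two coordinate lists scanned four times with builtin min/max.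
import Mathlib
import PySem

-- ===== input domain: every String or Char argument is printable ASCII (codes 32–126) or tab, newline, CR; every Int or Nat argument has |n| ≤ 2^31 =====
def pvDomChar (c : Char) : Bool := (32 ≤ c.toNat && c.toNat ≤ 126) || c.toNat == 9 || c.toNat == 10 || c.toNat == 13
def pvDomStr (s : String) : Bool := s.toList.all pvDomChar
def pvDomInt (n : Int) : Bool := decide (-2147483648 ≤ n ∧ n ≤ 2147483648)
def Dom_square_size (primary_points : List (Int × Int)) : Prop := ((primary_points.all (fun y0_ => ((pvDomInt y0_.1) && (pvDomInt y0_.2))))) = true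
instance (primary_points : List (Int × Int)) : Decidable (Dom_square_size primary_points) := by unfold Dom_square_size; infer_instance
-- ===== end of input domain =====

-- B replaces A's two coordinate lists and four min/max scans by a divide-and-conquer
-- recursion that merges the bounding boxes of the two halves (objective: alternative, same O(n) work).

-- ===== PORT A =====
def square_size (primary_points : List (Int × Int)) : Int :=
  let x_cords := primary_points.map (fun p => p.1)
  let y_cords := primary_points.map (fun p => p.2)
  match PySem.List.min? x_cords (fun v => v), PySem.List.max? x_cords (fun v => v),
        PySem.List.min? y_cords (fun v => v), PySem.List.max? y_cords (fun v => v) with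
  | some min_x, some max_x, some min_y, some max_y => max (max_x - min_x) (max_y - min_y)
  | _, _, _, _ => 0   -- unreachable under Pre_ (Python raises ValueError on [])

-- ===== PORT B =====
-- bbox pts = (min x, max x, min y, max y) of pts, by splitting in half and merging.
def ssBbox : List (Int × Int) → Int × Int × Int × Int
  | [] => (0, 0, 0, 0)          -- unreachable: Python B never recurses into an empty slice
  | [(x, y)] => (x, x, y, y)
  | p :: q :: t =>
      let k := (p :: q :: t).length / 2
      let (a1, b1, c1, d1) := ssBbox ((p :: q :: t).take k)
      let (a2, b2, c2, d2) := ssBbox ((p :: q :: t).drop k)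
      (min a1 a2, max b1 b2, min c1 c2, max d1 d2)
termination_by l => l.length
decreasing_by
  · simp only [List.length_take, List.length_cons]; omega
  · simp only [List.length_drop, List.length_cons]; omega

def square_size_alt (primary_points : List (Int × Int)) : Int :=
  match primary_points with
  | [] => 0   -- Python B raises ValueError here; outside Pre_
  | _ :: _ =>
      let (mnx, mxx, mny, mxy) := ssBbox primary_points
      max (mxx - mnx) (mxy - mny)

-- ===== PRECONDITION & SPEC =====
-- Pre_ excludes only the empty list, on which both Pythons raise ValueError.
def Pre_square_size (primary_points : List (Int × Int)) : Prop := primary_points ≠ []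
instance (primary_points : List (Int × Int)) : Decidable (Pre_square_size primary_points) := by unfold Pre_square_size; infer_instance
def pvWitness_square_size : (List (Int × Int)) := [(0, 3), (2, 1)]

def Spec_square_size (primary_points : List (Int × Int)) (out : Int) : Prop := out = square_size_alt primary_points
instance (primary_points : List (Int × Int)) (out : Int) : Decidable (Spec_square_size primary_points out) := by unfold Spec_square_size; infer_instance

-- ===== CLAIM (what is proved, stated in full; the proofs are below) =====
def Claim_equal_square_size : Prop := ∀ (primary_points : List (Int × Int)), Dom_square_size primary_points → Pre_square_size primary_points → Spec_square_size primary_points (square_size primary_points)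

-- ===== LEMMAS AND PROOFS =====
-- Nonempty-list extrema in running-fold form (what A's min/max compute).
def ssFMin : List Int → Int
  | [] => 0
  | a :: t => t.foldl min a

def ssFMax : List Int → Int
  | [] => 0
  | a :: t => t.foldl max a

theorem foldl_min_shift (l : List Int) (c a : Int) :
    l.foldl min (min c a) = min c (l.foldl min a) := by
  induction l generalizing a with
  | nil => rfl
  | cons h t ih => simp only [List.foldl_cons, min_assoc, ih]

theorem foldl_max_shift (l : List Int) (c a : Int) :
    l.foldl max (max c a) = max c (l.foldl max a) := by
  induction l generalizing a with
  | nil => rfl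
  | cons h t ih => simp only [List.foldl_cons, max_assoc, ih]

theorem ssFMin_append (l1 l2 : List Int) (h1 : l1 ≠ []) (h2 : l2 ≠ []) :
    ssFMin (l1 ++ l2) = min (ssFMin l1) (ssFMin l2) := by
  match l1, l2 with
  | a :: t1, b :: t2 =>
      simp only [ssFMin, List.cons_append, List.foldl_append, List.foldl_cons]
      exact foldl_min_shift t2 (t1.foldl min a) b

theorem ssFMax_append (l1 l2 : List Int) (h1 : l1 ≠ []) (h2 : l2 ≠ []) :
    ssFMax (l1 ++ l2) = max (ssFMax l1) (ssFMax l2) := by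
  match l1, l2 with
  | a :: t1, b :: t2 =>
      simp only [ssFMax, List.cons_append, List.foldl_append, List.foldl_cons]
      exact foldl_max_shift t2 (t1.foldl max a) b

theorem ssBbox_eq (l : List (Int × Int)) (h : l ≠ []) :
    ssBbox l = (ssFMin (l.map Prod.fst), ssFMax (l.map Prod.fst),
                ssFMin (l.map Prod.snd), ssFMax (l.map Prod.snd)) := by
  induction l using ssBbox.induct with
  | case1 => exact absurd rfl h
  | case2 x y => simp [ssBbox, ssFMin, ssFMax]
  | case3 p q t k u1 v1 w1 z1 h1 u2 v2 w2 z2 h2 ih1 ih2 =>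
      have hlen : 1 ≤ (p :: q :: t).length / 2 ∧ (p :: q :: t).length / 2 < (p :: q :: t).length := by
        simp only [List.length_cons]; omega
      have htk : (p :: q :: t).take ((p :: q :: t).length / 2) ≠ [] := by
        intro hc
        have := congrArg List.length hc
        simp only [List.length_take, List.length_nil] at this
        omega
      have hdr : (p :: q :: t).drop ((p :: q :: t).length / 2) ≠ [] := by
        intro hc
        have := congrArg List.length hc
        simp only [List.length_drop, List.length_nil] at this
        omega
      rw [ssBbox, ih1 htk, ih2 hdr]
      have hsplit : (p :: q :: t) = (p :: q :: t).take ((p :: q :: t).length / 2) ++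
          (p :: q :: t).drop ((p :: q :: t).length / 2) := (List.take_append_drop _ _).symm
      have htkm : ∀ f : (Int × Int) → Int,
          ((p :: q :: t).take ((p :: q :: t).length / 2)).map f ≠ [] :=
        fun f hc => htk (List.map_eq_nil_iff.mp hc)
      have hdrm : ∀ f : (Int × Int) → Int,
          ((p :: q :: t).drop ((p :: q :: t).length / 2)).map f ≠ [] :=
        fun f hc => hdr (List.map_eq_nil_iff.mp hc)
      conv_rhs => rw [hsplit]
      simp only [List.map_append]
      rw [ssFMin_append _ _ (htkm _) (hdrm _), ssFMax_append _ _ (htkm _) (hdrm _),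
          ssFMin_append _ _ (htkm _) (hdrm _), ssFMax_append _ _ (htkm _) (hdrm _)]

-- ===== VERDICT (by name: the statement is the Claim_ definition above) =====
theorem square_size_spec : Claim_equal_square_size := by
  intro pts _ hpre
  unfold Spec_square_size
  match pts with
  | [] => exact absurd rfl hpre
  | (x, y) :: t =>
      rw [square_size_alt, ssBbox_eq _ (by simp)]
      simp [square_size, ssFMin, ssFMax,
        PySem.List.min?_id_cons, PySem.List.max?_id_cons]
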